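-- pv_equiv track=rewrite | github.com/chrismaidlow/twitter-histogram | twitter-histogram.py | get_tags_by_month_for_users
-- ===== SOURCE A (Python) =====
-- def get_tags_by_month_for_users(data,usernames):
--     ''' Create list of tuples containing used hashtags for each month '''
--
--     #list of months and their set
--     tup_list = [(1,set()),(2,set()),(3,set()),(4,set()),(5,set()),(6,set()),(7,set()),(8,set()),(9,set()),(10,set()),(11,set()),(12,set())]
--
--     #iterate through data
--     for item in data:
--
--         user = item[0]
--
--         #check if member
--         if user in usernames:
--
--             month = item[1]
--
--             hashtags = item[2]
--
--             for item in tup_list: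
--
--                 entry_month = item[0]
--
--                 set_month = item[1]
--
--                 #if equal add month to set
--
--                 if month == entry_month:
--
--                     for item in hashtags:
--
--                         set_month.add(item)
--
--     return tup_list
-- ===== SOURCE B (Python) =====
-- def get_tags_by_month_for_users(data, usernames):
--     ''' Create list of tuples containing used hashtags for each month '''
--     # filter -> stable sort by month -> one linear merge of the sorted runs against months 1..12
--     members = set(usernames)
--     selected = sorted([r for r in data if r[0] in members], key=lambda r: r[1])
--     result = []
--     i, n = 0, len(selected)
--     for month in range(1, 13):
--         while i < n and selected[i][1] < month:   # skip months before this one (incl. < 1)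
--             i += 1
--         tags = set()
--         while i < n and selected[i][1] == month:  # consume this month's run
--             tags.update(selected[i][2])
--             i += 1
--         result.append((month, tags))
--     return result                                  # months > 12 left unconsumed, dropped
-- ===== Notes on version B (the rewrite author's own statement) =====
-- stated objective: alternative
-- what changed: A's single streaming pass that scans the 12-entry month table and the username list for every record is replaced by a staged pipeline: filter the records of selected users, stable-sort them by month, then one linear merge of the sorted runs against months 1..12 (two-pointer style); equivalence rests on the stability of the sort.
import Mathlib
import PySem

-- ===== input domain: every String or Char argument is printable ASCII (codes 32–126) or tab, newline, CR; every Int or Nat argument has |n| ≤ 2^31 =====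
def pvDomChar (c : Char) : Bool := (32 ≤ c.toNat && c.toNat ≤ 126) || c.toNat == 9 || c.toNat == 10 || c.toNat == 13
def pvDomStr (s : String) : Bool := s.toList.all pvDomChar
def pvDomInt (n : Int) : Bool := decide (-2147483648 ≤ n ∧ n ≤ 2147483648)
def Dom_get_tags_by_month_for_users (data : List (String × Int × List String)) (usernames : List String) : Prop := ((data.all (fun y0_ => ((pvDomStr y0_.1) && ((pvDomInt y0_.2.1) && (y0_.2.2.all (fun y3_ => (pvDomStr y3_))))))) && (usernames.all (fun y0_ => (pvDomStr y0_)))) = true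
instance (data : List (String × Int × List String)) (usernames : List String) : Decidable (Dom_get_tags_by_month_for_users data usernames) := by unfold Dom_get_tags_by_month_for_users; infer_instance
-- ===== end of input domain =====

-- B replaces A's single streaming pass (linear username-list membership per record + inner scan of the
-- 12-entry month table) by filter -> stable sort by month -> one linear merge of the sorted runs
-- against months 1..12; objective: alternative algorithm (sort-then-group), different traversal.


-- ===== PORT A =====
-- one data record updates the whole 12-entry month table (in-place set mutation ported as map)
def pvAStep (usernames : List String) (tup_list : List (Int × List String)) (item : String × Int × List String) : List (Int × List String) :=
  let user := item.1
  if usernames.contains user then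
    let month := item.2.1
    let hashtags := item.2.2
    tup_list.map (fun e =>
      if month == e.1 then (e.1, hashtags.foldl PySem.Set.add e.2) else e)
  else tup_list

def get_tags_by_month_for_users (data : List (String × Int × List String)) (usernames : List String) : List (Int × List String) :=
  data.foldl (pvAStep usernames)
    [(1, PySem.Set.empty), (2, PySem.Set.empty), (3, PySem.Set.empty), (4, PySem.Set.empty),
     (5, PySem.Set.empty), (6, PySem.Set.empty), (7, PySem.Set.empty), (8, PySem.Set.empty),
     (9, PySem.Set.empty), (10, PySem.Set.empty), (11, PySem.Set.empty), (12, PySem.Set.empty)]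

-- ===== PORT B =====
-- 'while i < n and selected[i][1] < month: i += 1' — advance past records of earlier months
def pvSkip (m : Int) : List (String × Int × List String) → List (String × Int × List String)
  | [] => []
  | r :: rest => if r.2.1 < m then pvSkip m rest else r :: rest

-- 'while i < n and selected[i][1] == month: tags.update(selected[i][2]); i += 1'
def pvRun (m : Int) (tags : List String) : List (String × Int × List String) → List String × List (String × Int × List String)
  | [] => (tags, [])
  | r :: rest => if r.2.1 == m then pvRun m (PySem.Set.update tags r.2.2) rest else (tags, r :: rest)

-- 'for month in range(1, 13): … result.append((month, tags))'
def pvMonths (sel : List (String × Int × List String)) : List Int → List (Int × List String)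
  | [] => []
  | m :: ms =>
    let sel1 := pvSkip m sel
    let run := pvRun m PySem.Set.empty sel1
    (m, run.1) :: pvMonths run.2 ms

def get_tags_by_month_for_users_alt (data : List (String × Int × List String)) (usernames : List String) : List (Int × List String) :=
  let members := PySem.Set.ofList usernames
  let selected := PySem.List.sorted (data.filter (fun r => PySem.Set.contains members r.1)) (fun r => r.2.1)
  pvMonths selected (PySem.List.pyRange 1 13 1)

-- ===== PRECONDITION & SPEC =====
def Spec_get_tags_by_month_for_users (data : List (String × Int × List String)) (usernames : List String) (out : List (Int × List String)) : Prop := out = get_tags_by_month_for_users_alt data usernames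
instance (data : List (String × Int × List String)) (usernames : List String) (out : List (Int × List String)) : Decidable (Spec_get_tags_by_month_for_users data usernames out) := by unfold Spec_get_tags_by_month_for_users; infer_instance

-- ===== CLAIM (what is proved, stated in full; the proofs are below) =====
def Claim_equal_get_tags_by_month_for_users : Prop := ∀ (data : List (String × Int × List String)) (usernames : List String), Dom_get_tags_by_month_for_users data usernames → Spec_get_tags_by_month_for_users data usernames (get_tags_by_month_for_users data usernames)

-- ===== LEMMAS AND PROOFS =====
-- common spec of both sides: the month-m set folded record by record, in data order
def pvStep (usernames : List String) (m : Int) (s : List String) (item : String × Int × List String) : List String :=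
  if usernames.contains item.1 && item.2.1 == m then PySem.Set.update s item.2.2 else s

def pvUpd (s : List String) (r : String × Int × List String) : List String := PySem.Set.update s r.2.2

-- ---- A-side: the table fold decomposes into independent per-month folds ----
theorem pvAStep_map (usernames : List String) (months : List Int) (f : Int → List String)
    (a : String × Int × List String) :
    pvAStep usernames (months.map (fun m => (m, f m))) a
      = months.map (fun m => (m, pvStep usernames m (f m) a)) := by
  by_cases h : usernames.contains a.1
  · simp only [pvAStep, pvStep, h, if_pos, Bool.true_and, List.map_map]
    refine List.map_congr_left (fun m _ => ?_)
    by_cases hm : a.2.1 = m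
    · simp [hm, PySem.Set.update]
    · simp [hm]
  · rw [List.contains_iff_mem] at h
    simp [pvAStep, pvStep, h]

theorem pvFold_map (usernames : List String) (data : List (String × Int × List String))
    (months : List Int) (f : Int → List String) :
    data.foldl (pvAStep usernames) (months.map (fun m => (m, f m)))
      = months.map (fun m => (m, data.foldl (pvStep usernames m) (f m))) := by
  induction data generalizing f with
  | nil => rfl
  | cons a data ih =>
      simp only [List.foldl_cons, pvAStep_map]
      exact ih (fun m => pvStep usernames m (f m) a)

-- ---- stability of PySem's insertion sort w.r.t. one key value ----
theorem pvInsertBy_pairwise (key : (String × Int × List String) → Int)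
    (x : String × Int × List String) (ys : List (String × Int × List String))
    (h : ys.Pairwise (fun a b => key a ≤ key b)) :
    (PySem.List.insertBy (fun a b => decide (key a < key b)) x ys).Pairwise (fun a b => key a ≤ key b) := by
  induction ys with
  | nil => simp [PySem.List.insertBy]
  | cons y ys ih =>
      rw [List.pairwise_cons] at h
      by_cases hlt : key x < key y
      · simp only [PySem.List.insertBy, hlt, decide_true, if_pos]
        refine List.pairwise_cons.mpr ⟨?_, List.pairwise_cons.mpr h⟩
        intro z hz
        rcases List.mem_cons.mp hz with rfl | hz
        · omega
        · have := h.1 z hz; omega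
      · simp only [PySem.List.insertBy, hlt, decide_false, if_neg, Bool.false_eq_true,
          not_false_eq_true]
        refine List.pairwise_cons.mpr ⟨?_, ih h.2⟩
        intro z hz
        rw [PySem.List.mem_insertBy] at hz
        rcases hz with rfl | hz
        · omega
        · exact h.1 z hz

theorem pvInsertBy_filter (key : (String × Int × List String) → Int) (m : Int)
    (x : String × Int × List String) (ys : List (String × Int × List String))
    (h : ys.Pairwise (fun a b => key a ≤ key b)) :
    (PySem.List.insertBy (fun a b => decide (key a < key b)) x ys).filter (fun y => key y == m)
      = if key x = m then ys.filter (fun y => key y == m) ++ [x]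
        else ys.filter (fun y => key y == m) := by
  induction ys with
  | nil =>
      by_cases hx : key x = m <;> simp [PySem.List.insertBy, List.filter, hx]
  | cons y ys ih =>
      rw [List.pairwise_cons] at h
      by_cases hlt : key x < key y
      · simp only [PySem.List.insertBy, hlt, decide_true, if_pos]
        by_cases hx : key x = m
        · -- everything in y :: ys has key > m, so its filter is empty
          have hnil : (y :: ys).filter (fun y => key y == m) = [] := by
            rw [List.filter_eq_nil_iff]
            intro z hz
            have hzge : key y ≤ key z := by
              rcases hz with _ | hz
              · omega
              · exact h.1 z (by assumption)
            simp only [beq_iff_eq]; omega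
          rw [List.filter_cons_of_pos (by simp [hx])]
          rw [show ((y :: ys).filter (fun y => key y == m)) = [] from hnil] at *
          simp [hx, hnil]
        · have hxf : (key x == m) = false := by simp [hx]
          simp only [List.filter, hxf, if_neg hx]
      · have hyx : key y ≤ key x := by omega
        simp only [PySem.List.insertBy, hlt, decide_false, Bool.false_eq_true, if_neg,
          not_false_eq_true]
        by_cases hy : key y = m
        · rw [List.filter_cons_of_pos (by simp [hy]), List.filter_cons_of_pos (by simp [hy]),
            ih h.2]
          by_cases hx : key x = m <;> simp [hx]
        · rw [List.filter_cons_of_neg (by simp [hy]), List.filter_cons_of_neg (by simp [hy]),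
            ih h.2]

theorem pvSort_foldl_filter (key : (String × Int × List String) → Int) (m : Int)
    (xs acc : List (String × Int × List String))
    (h : acc.Pairwise (fun a b => key a ≤ key b)) :
    (xs.foldl (fun acc x => PySem.List.insertBy (fun a b => decide (key a < key b)) x acc) acc).filter
        (fun y => key y == m)
      = acc.filter (fun y => key y == m) ++ xs.filter (fun y => key y == m) := by
  induction xs generalizing acc with
  | nil => simp
  | cons x xs ih =>
      rw [List.foldl_cons, ih _ (pvInsertBy_pairwise key x acc h), pvInsertBy_filter key m x acc h]
      by_cases hx : key x = m
      · simp [hx, List.filter_cons]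
      · simp [hx, List.filter_cons]

-- stability: records of month m appear in the stable sort in their original order
theorem pvSorted_filter (key : (String × Int × List String) → Int) (m : Int)
    (xs : List (String × Int × List String)) :
    (PySem.List.sorted xs key).filter (fun y => key y == m) = xs.filter (fun y => key y == m) := by
  rw [PySem.List.sorted_eq_foldl_insertBy, pvSort_foldl_filter key m xs [] List.Pairwise.nil]
  simp

-- ---- B-side: skip + run on a sorted list = filter ----
theorem pvSkip_sorted (m : Int) (l : List (String × Int × List String))
    (h : l.Pairwise (fun a b => a.2.1 ≤ b.2.1)) :
    pvSkip m l = l.filter (fun r => !(decide (r.2.1 < m))) := by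
  induction l with
  | nil => rfl
  | cons r rest ih =>
      rw [List.pairwise_cons] at h
      by_cases hr : r.2.1 < m
      · rw [List.filter_cons_of_neg (by simp [hr])]
        simpa [pvSkip, hr] using ih h.2
      · rw [List.filter_cons_of_pos (by simp [hr])]
        have : rest.filter (fun r => !(decide (r.2.1 < m))) = rest := by
          rw [List.filter_eq_self]
          intro z hz
          have := h.1 z hz
          simp only [Bool.not_eq_eq_eq_not, Bool.not_true, decide_eq_false_iff_not]
          omega
        simp only [pvSkip, if_neg hr]
        rw [this]

theorem pvRun_sorted (m : Int) (s : List String) (l : List (String × Int × List String))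
    (h : l.Pairwise (fun a b => a.2.1 ≤ b.2.1)) (hge : ∀ r ∈ l, m ≤ r.2.1) :
    pvRun m s l = ((l.filter (fun r => r.2.1 == m)).foldl pvUpd s,
                   l.filter (fun r => decide (m < r.2.1))) := by
  induction l generalizing s with
  | nil => rfl
  | cons r rest ih =>
      rw [List.pairwise_cons] at h
      by_cases hr : r.2.1 = m
      · rw [List.filter_cons_of_pos (by simp [hr]), List.filter_cons_of_neg (by simp [hr])]
        simp only [pvRun, if_pos (show (r.2.1 == m) = true by simp [hr])]
        exact ih (PySem.Set.update s r.2.2) h.2 (fun z hz => hge z (List.mem_cons_of_mem r hz))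
      · have hgt : m < r.2.1 := by have := hge r (List.mem_cons_self) ; omega
        rw [List.filter_cons_of_neg (by simp [hr]), List.filter_cons_of_pos (by simp [hgt])]
        have h1 : rest.filter (fun r => r.2.1 == m) = [] := by
          rw [List.filter_eq_nil_iff]
          intro z hz
          have := h.1 z hz
          simp only [beq_iff_eq]; omega
        have h2 : rest.filter (fun r => decide (m < r.2.1)) = rest := by
          rw [List.filter_eq_self]
          intro z hz
          have := h.1 z hz
          simp only [decide_eq_true_eq]; omega
        simp only [pvRun, if_neg (show ¬ (r.2.1 == m) = true by simp [hr])]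
        rw [h1, h2]
        simp

-- ---- the 1..12 merge over a sorted list = per-month filter folds ----
theorem pvMonths_eq (ms : List Int) (L : List (String × Int × List String))
    (hL : L.Pairwise (fun a b => a.2.1 ≤ b.2.1)) (hms : ms.Pairwise (· < ·)) :
    pvMonths L ms = ms.map (fun m => (m, (L.filter (fun r => r.2.1 == m)).foldl pvUpd PySem.Set.empty)) := by
  induction ms generalizing L with
  | nil => rfl
  | cons m ms ih =>
      rw [List.pairwise_cons] at hms
      simp only [pvMonths]
      rw [pvSkip_sorted m L hL]
      have hsub : L.filter (fun r => !(decide (r.2.1 < m))) |>.Pairwise (fun a b => a.2.1 ≤ b.2.1) :=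
        hL.filter _
      rw [pvRun_sorted m PySem.Set.empty _ hsub
        (by intro r hr; have := (List.mem_filter.mp hr).2; simp only [Bool.not_eq_eq_eq_not,
          Bool.not_true, decide_eq_false_iff_not] at this; omega)]
      simp only [List.filter_filter]
      have e1 : (L.filter (fun r => (r.2.1 == m) && !(decide (r.2.1 < m))))
          = L.filter (fun r => r.2.1 == m) := by
        apply List.filter_congr
        intro r _
        by_cases h : r.2.1 = m <;> simp [h] <;> omega
      have e2 : (L.filter (fun r => decide (m < r.2.1) && !(decide (r.2.1 < m))))
          = L.filter (fun r => decide (m < r.2.1)) := by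
        apply List.filter_congr
        intro r _
        by_cases h : m < r.2.1 <;> simp [h] <;> omega
      rw [e1, e2, ih (L.filter (fun r => decide (m < r.2.1))) (hL.filter _) hms.2]
      rw [List.map_cons]
      congr 1
      apply List.map_congr_left
      intro m' hm'
      have hmm' : m < m' := hms.1 m' hm'
      have e3 : (L.filter (fun r => decide (m < r.2.1))).filter (fun r => r.2.1 == m')
          = L.filter (fun r => r.2.1 == m') := by
        simp only [List.filter_filter]
        apply List.filter_congr
        intro r _
        by_cases h : r.2.1 = m' <;> simp [h] <;> omega
      rw [e3]

theorem pvRange_1_13 : PySem.List.pyRange 1 13 1 = [1,2,3,4,5,6,7,8,9,10,11,12] := by decide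

-- ===== VERDICT (by name: the statement is the Claim_ definition above) =====
theorem get_tags_by_month_for_users_spec : Claim_equal_get_tags_by_month_for_users := by
  intro data usernames _
  show _ = _
  have h0 : ([(1, PySem.Set.empty), (2, PySem.Set.empty), (3, PySem.Set.empty), (4, PySem.Set.empty),
     (5, PySem.Set.empty), (6, PySem.Set.empty), (7, PySem.Set.empty), (8, PySem.Set.empty),
     (9, PySem.Set.empty), (10, PySem.Set.empty), (11, PySem.Set.empty), (12, PySem.Set.empty)] :
      List (Int × List String))
      = ([1,2,3,4,5,6,7,8,9,10,11,12] : List Int).map (fun m => (m, (PySem.Set.empty : List String))) := rfl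
  rw [get_tags_by_month_for_users, get_tags_by_month_for_users_alt, h0, pvFold_map]
  rw [pvMonths_eq _ _ (PySem.List.sorted_pairwise _ _) (by decide), pvRange_1_13]
  apply List.map_congr_left
  intro m _
  congr 1
  rw [pvSorted_filter (fun r => r.2.1) m]
  rw [List.filter_filter]
  have : data.foldl (pvStep usernames m) PySem.Set.empty
      = (data.filter (fun item => usernames.contains item.1 && item.2.1 == m)).foldl pvUpd PySem.Set.empty := by
    rw [← PySem.List.foldl_if_eq_foldl_filter (fun item => usernames.contains item.1 && item.2.1 == m) pvUpd]
    rfl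
  rw [this]
  congr 1
  apply List.filter_congr
  intro r _
  have : PySem.Set.contains (PySem.Set.ofList usernames) r.1 = usernames.contains r.1 := by
    simp [List.contains_iff_mem, PySem.Set.mem_ofList]
  rw [Bool.and_comm]
  rw [this]
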